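-- pv_equiv track=rewrite | github.com/jschneck-arch/skg | skg-discovery/discovery.py | extract_http_info
-- ===== SOURCE A (Python) =====
-- def extract_http_info(banner: str) -> dict:
--     """Extract server info from HTTP banner."""
--     info = {}
--     for line in banner.splitlines():
--         lower = line.lower()
--         if lower.startswith("server:"):
--             info["server"] = line.split(":", 1)[1].strip()
--         elif lower.startswith("x-powered-by:"):
--             info["powered_by"] = line.split(":", 1)[1].strip()
--         elif lower.startswith("location:"):
--             info["redirect"] = line.split(":", 1)[1].strip()
--     return info
-- ===== SOURCE B (Python) =====
-- _RENAME = {"server": "server", "x-powered-by": "powered_by", "location": "redirect"}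
--
--
-- def extract_http_info(banner: str) -> dict:
--     """Extract server info from HTTP banner (staged: parse ALL headers into a dict, then project the known ones)."""
--     headers = {}
--     for line in banner.splitlines():
--         head, sep, tail = line.partition(":")
--         if sep:
--             headers[head.lower()] = tail.strip()
--     info = {}
--     for key, value in headers.items():
--         out = _RENAME.get(key)
--         if out is not None:
--             info[out] = value
--     return info
-- ===== Notes on version B (the rewrite author's own statement) =====
-- stated objective: alternative
-- what changed: Replaces A's single pass with a per-line startswith if/elif chain by a staged decomposition: one generic pass parses every 'key: value' header line into a dict (key lowercased, last wins), then a second pass over that dict projects and renames the three known keys, preserving first-insertion order.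
import Mathlib
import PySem

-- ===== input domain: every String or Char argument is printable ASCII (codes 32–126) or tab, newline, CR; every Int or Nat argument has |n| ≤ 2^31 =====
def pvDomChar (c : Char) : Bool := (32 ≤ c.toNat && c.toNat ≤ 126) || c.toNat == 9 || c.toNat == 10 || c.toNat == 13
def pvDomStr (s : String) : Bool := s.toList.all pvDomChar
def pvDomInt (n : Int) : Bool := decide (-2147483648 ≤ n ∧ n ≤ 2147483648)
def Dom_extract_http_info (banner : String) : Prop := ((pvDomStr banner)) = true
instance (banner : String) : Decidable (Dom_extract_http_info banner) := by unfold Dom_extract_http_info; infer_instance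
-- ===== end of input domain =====

-- B replaces A's one-pass startswith if/elif chain by a staged decomposition: a first generic
-- pass parses every 'key: value' line into a headers dict, a second pass projects and renames
-- the three known keys (objective: alternative decomposition, same cost).

-- ===== PORT A =====
-- one iteration of A's 'for line in banner.splitlines()' loop
def pvAStep (info : PySem.Dict String String) (line : String) : PySem.Dict String String :=
  let lower := PySem.Str.lower line
  -- line.split(":", 1)[1]: under each startswith guard the colon is present, so split yields two
  -- parts and index 1 never raises; the .getD defaults are unreachable.
  if PySem.Str.startswith lower "server:" then
    info.insert "server" (PySem.Str.strip (((PySem.Str.splitMax? line ":" 1).getD []).getD 1 ""))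
  else if PySem.Str.startswith lower "x-powered-by:" then
    info.insert "powered_by" (PySem.Str.strip (((PySem.Str.splitMax? line ":" 1).getD []).getD 1 ""))
  else if PySem.Str.startswith lower "location:" then
    info.insert "redirect" (PySem.Str.strip (((PySem.Str.splitMax? line ":" 1).getD []).getD 1 ""))
  else info

def extract_http_info (banner : String) : List (String × String) :=
  ((PySem.Str.splitlines banner).foldl pvAStep PySem.Dict.empty).items

-- ===== PORT B =====
def pvRename : PySem.Dict String String :=
  PySem.Dict.ofList [("server", "server"), ("x-powered-by", "powered_by"), ("location", "redirect")]

-- pass 1, one line: head, sep, tail = line.partition(":") ported as find + two slices;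
-- store head.lower() -> tail.strip() when the separator was found
def pvBLineStep (h : PySem.Dict String String) (line : String) : PySem.Dict String String :=
  let i := PySem.Str.find line ":"
  if i = -1 then h          -- sep == "": no colon in the line
  else
    h.insert (PySem.Str.lower (PySem.Str.slice line none (some i)))
      (PySem.Str.strip (PySem.Str.slice line (some (i + 1)) none))

-- pass 2, one header item: rename the key if it is one of the known three, else drop it
def pvBProjStep (info : PySem.Dict String String) (p : String × String) : PySem.Dict String String :=
  match pvRename.get? p.1 with
  | some out => info.insert out p.2
  | none => info

def extract_http_info_alt (banner : String) : List (String × String) :=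
  let headers := (PySem.Str.splitlines banner).foldl pvBLineStep PySem.Dict.empty
  (headers.items.foldl pvBProjStep PySem.Dict.empty).items

-- ===== PRECONDITION & SPEC =====
def Spec_extract_http_info (banner : String) (out : List (String × String)) : Prop := out = extract_http_info_alt banner
instance (banner : String) (out : List (String × String)) : Decidable (Spec_extract_http_info banner out) := by unfold Spec_extract_http_info; infer_instance

-- ===== CLAIM (what is proved, stated in full; the proofs are below) =====
def Claim_equal_extract_http_info : Prop := ∀ (banner : String), Dom_extract_http_info banner → Spec_extract_http_info banner (extract_http_info banner)

-- ===== LEMMAS AND PROOFS =====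

-- the projection pass 2 performs, as a function on items lists
def pvProj (l : List (String × String)) : List (String × String) :=
  l.filterMap (fun p => (pvRename.get? p.1).map (fun o => (o, p.2)))

-- pvRename.get?, computed out as an if-chain
theorem pv_lookup (k : String) : pvRename.get? k =
    if k = "server" then some "server"
    else if k = "x-powered-by" then some "powered_by"
    else if k = "location" then some "redirect" else none := by
  have h : pvRename
      = PySem.Dict.mk [("server", "server"), ("x-powered-by", "powered_by"), ("location", "redirect")] := by
    decide
  rw [h]
  by_cases e1 : k = "server" <;> by_cases e2 : k = "x-powered-by" <;> by_cases e3 : k = "location" <;>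
    simp_all [PySem.Dict.get?, beq_iff_eq, Ne.symm]

-- the rename table is injective where defined
theorem pv_rename_inj {a b out : String} (ha : pvRename.get? a = some out)
    (hb : pvRename.get? b = some out) : a = b := by
  rw [pv_lookup] at ha hb
  split_ifs at ha hb <;> simp only [Option.some.injEq] at ha hb <;> subst_vars <;> simp_all

-- lowerChar maps nothing onto ':' except ':' itself
theorem pv_lowerChar_eq_colon {c : Char} (h : PySem.Chars.lowerChar c = ':') : c = ':' := by
  unfold PySem.Chars.lowerChar PySem.Chars.isupper at h
  split at h
  · rename_i hu
    simp only [Bool.and_eq_true, decide_eq_true_eq] at hu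
    have hlo : 65 ≤ c.toNat := hu.1
    have hhi : c.toNat ≤ 90 := hu.2
    have hv : (c.toNat + 32).isValidChar := Or.inl (by omega)
    have ht := congrArg Char.toNat h
    rw [Char.toNat_ofNat, if_pos hv] at ht
    have : (':').toNat = 58 := by decide
    omega
  · exact h

theorem pv_colon_not_mem_lower {pre : List Char} (h : ':' ∉ pre) :
    ':' ∉ PySem.Chars.lower pre := by
  intro hm
  unfold PySem.Chars.lower at hm
  obtain ⟨c, hc, hlc⟩ := List.mem_map.mp hm
  exact h (pv_lowerChar_eq_colon hlc ▸ hc)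

-- (q ++ [a]) is a prefix of (ys ++ a :: zs) iff q = ys, when a occurs in neither q nor ys
theorem pv_prefix_upto (a : Char) : ∀ (q ys zs : List Char), a ∉ q → a ∉ ys →
    ((q ++ [a]) <+: (ys ++ a :: zs) ↔ q = ys) := by
  intro q
  induction q with
  | nil =>
    intro ys zs _ hys
    cases ys with
    | nil => simp
    | cons y ys' =>
      simp only [List.nil_append, List.cons_append, List.cons_prefix_cons]
      constructor
      · rintro ⟨rfl, -⟩; exact absurd (List.mem_cons_self) hys
      · intro h; exact absurd h (by simp)
  | cons c q' ih =>
    intro ys zs hq hys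
    cases ys with
    | nil =>
      simp only [List.nil_append, List.cons_append, List.cons_prefix_cons]
      constructor
      · rintro ⟨rfl, -⟩; exact absurd (List.mem_cons_self) hq
      · intro h; exact absurd h (by simp)
    | cons y ys' =>
      simp only [List.cons_append, List.cons_prefix_cons]
      rw [ih ys' zs (fun h => hq (List.mem_cons_of_mem _ h)) (fun h => hys (List.mem_cons_of_mem _ h))]
      constructor
      · rintro ⟨rfl, rfl⟩; rfl
      · intro h; injection h with h1 h2; exact ⟨h1, h2⟩

-- A's guard, characterised on the first-colon decomposition of the line
theorem pv_startswith_char (pre post q : List Char) (hpre : ':' ∉ pre) (hq : ':' ∉ q) :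
    PySem.Chars.startswith (PySem.Chars.lower (pre ++ ':' :: post)) (q ++ [':']) = true ↔
      q = PySem.Chars.lower pre := by
  have hmap : PySem.Chars.lower (pre ++ ':' :: post)
      = PySem.Chars.lower pre ++ ':' :: PySem.Chars.lower post := by
    unfold PySem.Chars.lower
    simp [PySem.Chars.lowerChar, PySem.Chars.isupper]
  rw [hmap, PySem.Chars.startswith_iff]
  exact pv_prefix_upto ':' q (PySem.Chars.lower pre) (PySem.Chars.lower post) hq
    (pv_colon_not_mem_lower hpre)

-- A's guard is false when the line has no colon at all
theorem pv_startswith_no_colon (cs q : List Char) (h : ':' ∉ cs) :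
    PySem.Chars.startswith (PySem.Chars.lower cs) (q ++ [':']) = false := by
  by_contra hb
  have : PySem.Chars.startswith (PySem.Chars.lower cs) (q ++ [':']) = true := by
    cases hx : PySem.Chars.startswith (PySem.Chars.lower cs) (q ++ [':']) with
    | true => rfl
    | false => exact absurd hx hb
  rw [PySem.Chars.startswith_iff] at this
  have hmem : ':' ∈ PySem.Chars.lower cs := this.mem (by simp)
  unfold PySem.Chars.lower at hmem
  obtain ⟨c, hc, hlc⟩ := List.mem_map.mp hmem
  exact h (pv_lowerChar_eq_colon hlc ▸ hc)

-- splitOnMax.go, maxsplit exhausted: collect the rest as one piece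
theorem pv_go_zero (fuel : Nat) (l : List Char) (acc : List (List Char)) :
    PySem.Chars.splitOnMax.go [':'] fuel 0 l [] acc = (l :: acc).reverse := by
  cases fuel with
  | zero => simp [PySem.Chars.splitOnMax.go]
  | succ f => cases l <;> simp [PySem.Chars.splitOnMax.go]

-- splitOnMax.go with maxsplit 1 on a line whose first colon follows pre
theorem pv_go_one : ∀ (pre : List Char) (fuel : Nat) (post cur : List Char)
    (acc : List (List Char)), ':' ∉ pre → pre.length < fuel →
    PySem.Chars.splitOnMax.go [':'] fuel 1 (pre ++ ':' :: post) cur acc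
      = acc.reverse ++ [cur.reverse ++ pre, post] := by
  intro pre
  induction pre with
  | nil =>
    intro fuel post cur acc _ hf
    cases fuel with
    | zero => omega
    | succ f =>
      simp only [List.nil_append]
      rw [show PySem.Chars.splitOnMax.go [':'] (f + 1) 1 (':' :: post) cur acc
          = PySem.Chars.splitOnMax.go [':'] f 0 (List.drop 1 (':' :: post)) [] (cur.reverse :: acc) from by
        simp [PySem.Chars.splitOnMax.go, List.isPrefixOf]]
      rw [List.drop_one, List.tail_cons, pv_go_zero]
      simp
  | cons c pre' ih =>
    intro fuel post cur acc hpre hf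
    cases fuel with
    | zero => simp at hf
    | succ f =>
      have hc : c ≠ ':' := fun h => hpre (h ▸ List.mem_cons_self)
      rw [show PySem.Chars.splitOnMax.go [':'] (f + 1) 1 ((c :: pre') ++ ':' :: post) cur acc
          = PySem.Chars.splitOnMax.go [':'] f 1 (pre' ++ ':' :: post) (c :: cur) acc from by
        simp [PySem.Chars.splitOnMax.go, List.isPrefixOf, Ne.symm hc]]
      rw [ih f post (c :: cur) acc (fun h => hpre (List.mem_cons_of_mem _ h)) (by simp at hf ⊢; omega)]
      simp

-- line.split(":", 1) on the first-colon decomposition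
theorem pv_splitMax (pre post : List Char) (hpre : ':' ∉ pre) :
    PySem.Chars.splitMax? (pre ++ ':' :: post) [':'] 1 = some [pre, post] := by
  unfold PySem.Chars.splitMax? PySem.Chars.splitOnMax
  norm_num
  rw [pv_go_one pre (pre.length + (post.length + 1) + 1) post [] [] hpre (by omega)]
  simp

-- the first colon of the line sits right after pre
theorem pv_find_colon (pre post : List Char) (hpre : ':' ∉ pre) :
    PySem.Chars.find (pre ++ ':' :: post) [':'] = (pre.length : Int) := by
  set cs := pre ++ ':' :: post with hcs
  have hmem : ':' ∈ cs := by simp [hcs]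
  have hnn : 0 ≤ PySem.Chars.find cs [':'] :=
    (PySem.Chars.find_nonneg_iff cs [':']).mpr ((List.singleton_infix_iff ':' cs).mpr hmem)
  obtain ⟨hpref, hmin⟩ := PySem.Chars.find_spec hnn
  set n := (PySem.Chars.find cs [':']).toNat with hn
  have hat : cs[n]? = some ':' := by
    rcases hpref with ⟨t, ht⟩
    rw [← List.head?_drop, ← ht]
    rfl
  have hne : n = pre.length := by
    rcases Nat.lt_trichotomy n pre.length with h | h | h
    · exfalso
      have : cs[n]? = pre[n]? := by
        rw [hcs, List.getElem?_append_left h]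
      rw [this, List.getElem?_eq_getElem h] at hat
      have : pre[n] = ':' := by injection hat
      exact hpre (this ▸ pre.getElem_mem h)
    · exact h
    · exfalso
      apply hmin pre.length h
      rw [hcs, List.drop_left]
      exact ⟨post, rfl⟩
  have := Int.toNat_of_nonneg hnn
  omega

-- split a list at the first occurrence of a
theorem pv_first_split {a : Char} {l : List Char} (h : a ∈ l) :
    ∃ s t, l = s ++ a :: t ∧ a ∉ s := by
  induction l with
  | nil => cases h
  | cons x xs ih =>
    by_cases hx : x = a
    · exact ⟨[], xs, by simp [hx], by simp⟩
    · rcases List.mem_cons.mp h with h' | hm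
      · exact absurd h'.symm hx
      · obtain ⟨s, t, hl, hs⟩ := ih hm
        exact ⟨x :: s, t, by simp [hl], by simp [hs, Ne.symm hx]⟩

-- projection distributes over append
theorem pv_proj_append (l l' : List (String × String)) :
    pvProj (l ++ l') = pvProj l ++ pvProj l' := List.filterMap_append

-- overwriting an unrenamed key is invisible to the projection
theorem pv_proj_map_none (l : List (String × String)) (k v : String)
    (hk : pvRename.get? k = none) :
    pvProj (l.map (fun p => if p.1 == k then (k, v) else p)) = pvProj l := by
  unfold pvProj
  rw [List.filterMap_map]
  apply List.filterMap_congr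
  intro p _
  by_cases hp : p.1 = k
  · simp [Function.comp, hp, hk]
  · simp [Function.comp, beq_eq_false_iff_ne.mpr hp]

-- overwriting a renamed key commutes with the projection
theorem pv_proj_map_some (l : List (String × String)) (k out v : String)
    (hk : pvRename.get? k = some out) :
    pvProj (l.map (fun p => if p.1 == k then (k, v) else p))
      = (pvProj l).map (fun q => if q.1 == out then (out, v) else q) := by
  unfold pvProj
  rw [List.filterMap_map, List.map_filterMap]
  apply List.filterMap_congr
  intro p _
  by_cases hp : p.1 = k
  · simp [Function.comp, hp, hk]
  · cases hr : pvRename.get? p.1 with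
    | none => simp [Function.comp, beq_eq_false_iff_ne.mpr hp, hr]
    | some o =>
      have ho : o ≠ out := fun e => hp (pv_rename_inj (e ▸ hr) hk)
      simp [Function.comp, beq_eq_false_iff_ne.mpr hp, hr]
      exact fun e => absurd e ho

-- which keys the projection produces
theorem pv_mem_proj_fst (l : List (String × String)) (out : String) :
    out ∈ (pvProj l).map Prod.fst ↔ ∃ k v, (k, v) ∈ l ∧ pvRename.get? k = some out := by
  simp only [pvProj, List.map_filterMap, List.mem_filterMap]
  constructor
  · rintro ⟨⟨k, v⟩, hm, h⟩
    simp only [Option.map_map, Option.map_eq_some_iff] at h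
    obtain ⟨o, ho, rfl⟩ := h
    exact ⟨k, v, hm, ho⟩
  · rintro ⟨k, v, hm, ho⟩
    exact ⟨(k, v), hm, by simp [ho]⟩

-- inserting into the headers dict acts on the projection like A's own insert (or not at all)
theorem pv_insert_rel (d h : PySem.Dict String String) (k v : String)
    (hrel : d.items = pvProj h.items) :
    (match pvRename.get? k with
      | some out => (d.insert out v).items
      | none => d.items) = pvProj ((h.insert k v).items) := by
  cases hr : pvRename.get? k with
  | none =>
    show d.items = pvProj ((h.insert k v).items)
    by_cases hc : h.contains k = true
    · rw [PySem.Dict.items_insert_of_contains h v hc, pv_proj_map_none _ _ _ hr, hrel]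
    · rw [PySem.Dict.items_insert_of_not_contains h v (Bool.eq_false_iff.mpr hc),
        pv_proj_append, hrel]
      simp [pvProj, hr]
  | some out =>
    show (d.insert out v).items = pvProj ((h.insert k v).items)
    have hkeys : d.keys = (pvProj h.items).map Prod.fst := by
      simp only [PySem.Dict.keys, hrel]
    by_cases hc : h.contains k = true
    · -- k already a header: both sides overwrite in place
      have hmemk : ∃ v', (k, v') ∈ h.items := by
        have hk' : k ∈ h.keys := (PySem.Dict.contains_iff_mem_keys h k).mp hc
        simp only [PySem.Dict.keys, List.mem_map] at hk'
        obtain ⟨p, hm, he⟩ := hk'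
        exact ⟨p.2, by rw [← he]; exact hm⟩
      obtain ⟨v', hv'⟩ := hmemk
      have hdc : d.contains out = true := by
        apply (PySem.Dict.contains_iff_mem_keys d out).mpr
        rw [hkeys]
        exact (pv_mem_proj_fst _ _).mpr ⟨k, v', hv', hr⟩
      rw [PySem.Dict.items_insert_of_contains h v hc, PySem.Dict.items_insert_of_contains d v hdc,
        pv_proj_map_some _ _ _ _ hr, hrel]
    · -- fresh header key: both sides append
      have hdc : ¬ d.contains out = true := by
        intro hm
        have := (PySem.Dict.contains_iff_mem_keys d out).mp hm
        rw [hkeys] at this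
        obtain ⟨k', v', hm', hr'⟩ := (pv_mem_proj_fst _ _).mp this
        have : k' = k := pv_rename_inj hr' hr
        subst this
        exact hc ((PySem.Dict.contains_iff_mem_keys h k').mpr
          (by simp only [PySem.Dict.keys, List.mem_map]; exact ⟨(k', v'), hm', rfl⟩))
      rw [PySem.Dict.items_insert_of_not_contains h v (Bool.eq_false_iff.mpr hc),
        PySem.Dict.items_insert_of_not_contains d v (Bool.eq_false_iff.mpr hdc),
        pv_proj_append, hrel]
      simp [pvProj, hr]

-- per-line agreement: A's update is the projection of B's generic header update
theorem pv_line_rel (d h : PySem.Dict String String) (line : String)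
    (hrel : d.items = pvProj h.items) :
    (pvAStep d line).items = pvProj ((pvBLineStep h line).items) := by
  by_cases hcol : ':' ∈ line.toList
  · obtain ⟨pre, post, hl, hpre⟩ := pv_first_split hcol
    have hfind : PySem.Str.find line ":" = (pre.length : Int) := by
      show PySem.Chars.find line.toList [':'] = _
      rw [hl]; exact pv_find_colon pre post hpre
    have guard : ∀ (qs : String) (q : List Char), qs.toList = q ++ [':'] → ':' ∉ q →
        PySem.Str.startswith (PySem.Str.lower line) qs = decide (q = PySem.Chars.lower pre) := by
      intro qs q hqs hq
      have hb : PySem.Str.startswith (PySem.Str.lower line) qs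
          = PySem.Chars.startswith (PySem.Chars.lower line.toList) qs.toList := by
        simp [pysem]
      rw [hb, hqs, hl]
      cases hdq : decide (q = PySem.Chars.lower pre) with
      | true => rw [(pv_startswith_char pre post q hpre hq).mpr (of_decide_eq_true hdq)]
      | false =>
        exact Bool.eq_false_iff.mpr
          (fun h => (of_decide_eq_false hdq) ((pv_startswith_char pre post q hpre hq).mp h))
    have htail : PySem.Str.slice line (some ((pre.length : Int) + 1)) none = String.ofList post := by
      have h1 : (PySem.Str.slice line (some ((pre.length : Int) + 1)) none).toList = post := by
        simp only [PySem.Str.toList_slice, PySem.Chars.slice_eq_listSlice]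
        rw [show ((pre.length : Int) + 1) = ((pre.length + 1 : Nat) : Int) by push_cast; ring]
        rw [PySem.List.slice_from_natCast, hl]
        rw [show pre ++ ':' :: post = (pre ++ [':']) ++ post by simp]
        rw [List.drop_left' (by simp)]
      rw [← h1, String.ofList_toList]
    have hhead : PySem.Str.lower (PySem.Str.slice line none (some (pre.length : Int)))
        = String.ofList (PySem.Chars.lower pre) := by
      have h1 : (PySem.Str.slice line none (some (pre.length : Int))).toList = pre := by
        simp only [PySem.Str.toList_slice, PySem.Chars.slice_eq_listSlice]
        rw [PySem.List.slice_to_natCast, hl, List.take_left]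
      have h2 := congrArg String.ofList h1
      rw [String.ofList_toList] at h2
      rw [h2]
      simp [PySem.Str.lower]
    have hsplit : ((PySem.Str.splitMax? line ":" 1).getD []).getD 1 "" = String.ofList post := by
      unfold PySem.Str.splitMax?
      rw [show (":".toList) = [':'] from rfl, hl, pv_splitMax pre post hpre]
      simp [List.getD]
    have g1 := guard "server:" "server".toList rfl (by decide)
    have g2 := guard "x-powered-by:" "x-powered-by".toList rfl (by decide)
    have g3 := guard "location:" "location".toList rfl (by decide)
    have hins := pv_insert_rel d h (String.ofList (PySem.Chars.lower pre))
      (PySem.Str.strip (String.ofList post)) hrel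
    have hKeq : ∀ s : String, (String.ofList (PySem.Chars.lower pre) = s)
        ↔ (s.toList = PySem.Chars.lower pre) := by
      intro s
      constructor
      · intro e; rw [← e, String.toList_ofList]
      · intro e; rw [← e, String.ofList_toList]
    unfold pvAStep pvBLineStep
    simp only [g1, g2, g3, hfind, hsplit, htail, hhead]
    rw [if_neg (show ¬((pre.length : Int) = -1) by omega)]
    rw [pv_lookup] at hins
    by_cases h1 : "server".toList = PySem.Chars.lower pre
    · rw [decide_eq_true h1]
      rw [if_pos ((hKeq "server").mpr h1)] at hins
      simpa using hins
    · have k1 : ¬ (String.ofList (PySem.Chars.lower pre) = "server") :=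
        fun e => h1 ((hKeq "server").mp e)
      rw [if_neg k1] at hins
      by_cases h2 : "x-powered-by".toList = PySem.Chars.lower pre
      · rw [decide_eq_false h1, decide_eq_true h2]
        rw [if_pos ((hKeq "x-powered-by").mpr h2)] at hins
        simpa using hins
      · have k2 : ¬ (String.ofList (PySem.Chars.lower pre) = "x-powered-by") :=
          fun e => h2 ((hKeq "x-powered-by").mp e)
        rw [if_neg k2] at hins
        by_cases h3 : "location".toList = PySem.Chars.lower pre
        · rw [decide_eq_false h1, decide_eq_false h2, decide_eq_true h3]
          rw [if_pos ((hKeq "location").mpr h3)] at hins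
          simpa using hins
        · have k3 : ¬ (String.ofList (PySem.Chars.lower pre) = "location") :=
            fun e => h3 ((hKeq "location").mp e)
          rw [if_neg k3] at hins
          rw [decide_eq_false h1, decide_eq_false h2, decide_eq_false h3]
          simpa using hins
  · have hfind : PySem.Str.find line ":" = -1 := by
      show PySem.Chars.find line.toList [':'] = -1
      exact (PySem.Chars.find_eq_neg_one_iff _ _).mpr
        (fun hinf => hcol ((List.singleton_infix_iff ':' _).mp hinf))
    have guard0 : ∀ (qs : String) (q : List Char), qs.toList = q ++ [':'] →
        PySem.Str.startswith (PySem.Str.lower line) qs = false := by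
      intro qs q hqs
      have hb : PySem.Str.startswith (PySem.Str.lower line) qs
          = PySem.Chars.startswith (PySem.Chars.lower line.toList) qs.toList := by
        simp [pysem]
      rw [hb, hqs]
      exact pv_startswith_no_colon line.toList q hcol
    have g1 := guard0 "server:" "server".toList rfl
    have g2 := guard0 "x-powered-by:" "x-powered-by".toList rfl
    have g3 := guard0 "location:" "location".toList rfl
    unfold pvAStep pvBLineStep
    simp only [g1, g2, g3, hfind]
    simp [hrel]

-- the invariant carried through the whole line loop
theorem pv_fold_rel (lines : List String) : ∀ (d h : PySem.Dict String String),
    d.items = pvProj h.items →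
    (lines.foldl pvAStep d).items = pvProj ((lines.foldl pvBLineStep h).items) := by
  induction lines with
  | nil => intro d h hrel; simpa using hrel
  | cons line rest ih =>
    intro d h hrel
    simp only [List.foldl_cons]
    -- need the new pair to satisfy the invariant
    exact ih (pvAStep d line) (pvBLineStep h line) (pv_line_rel d h line hrel)

-- the headers dict keeps unique keys through pass 1
theorem pv_fold_nodup (lines : List String) : ∀ (h : PySem.Dict String String),
    h.keys.Nodup → ((lines.foldl pvBLineStep h).keys).Nodup := by
  induction lines with
  | nil => intro h hn; simpa using hn
  | cons line rest ih =>
    intro h hn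
    simp only [List.foldl_cons]
    apply ih
    by_cases hf : PySem.Chars.find line.toList [':'] = -1
    · simpa [pvBLineStep, PySem.Str.find, hf] using hn
    · simpa [pvBLineStep, PySem.Str.find, hf] using PySem.Dict.nodup_keys_insert h _ _ hn

-- the projection of a nodup-keyed items list has nodup keys
theorem pv_proj_nodup (l : List (String × String)) (h : (l.map Prod.fst).Nodup) :
    ((pvProj l).map Prod.fst).Nodup := by
  induction l with
  | nil => simp [pvProj]
  | cons p t ih =>
    simp only [List.map_cons, List.nodup_cons] at h
    cases hr : pvRename.get? p.1 with
    | none => simpa [pvProj, List.filterMap_cons, hr] using ih h.2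
    | some out =>
      simp only [pvProj, List.filterMap_cons, hr, Option.map_some, List.map_cons,
        List.nodup_cons]
      refine ⟨fun hm => ?_, ih h.2⟩
      obtain ⟨k, v, hm', hr'⟩ := (pv_mem_proj_fst t out).mp hm
      have : k = p.1 := pv_rename_inj hr' hr
      subst this
      exact h.1 (List.mem_map.mpr ⟨(p.1, v), hm', rfl⟩)

-- pass 2: folding the rename step over an items list appends exactly the projection
theorem pv_proj_fold (l : List (String × String)) : ∀ (d : PySem.Dict String String),
    ((d.items.map Prod.fst) ++ (pvProj l).map Prod.fst).Nodup →
    (l.foldl pvBProjStep d).items = d.items ++ pvProj l := by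
  induction l with
  | nil => intro d _; simp [pvProj]
  | cons p t ih =>
    intro d hnd
    simp only [List.foldl_cons]
    cases hr : pvRename.get? p.1 with
    | none =>
      have hstep : pvBProjStep d p = d := by unfold pvBProjStep; rw [hr]
      rw [hstep, ih d (by simpa [pvProj, List.filterMap_cons, hr] using hnd)]
      simp [pvProj, hr]
    | some out =>
      have hproj : pvProj (p :: t) = (out, p.2) :: pvProj t := by
        simp [pvProj, hr]
      rw [hproj] at hnd
      simp only [List.map_cons] at hnd
      have hfresh : ¬ d.contains out = true := by
        intro hc
        have hmem : out ∈ d.items.map Prod.fst :=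
          by simpa only [PySem.Dict.keys] using (PySem.Dict.contains_iff_mem_keys d out).mp hc
        have := List.disjoint_of_nodup_append hnd
        exact this hmem (by simp)
      have hstep : pvBProjStep d p = d.insert out p.2 := by unfold pvBProjStep; rw [hr]
      have hitems := PySem.Dict.items_insert_of_not_contains d p.2 (Bool.eq_false_iff.mpr hfresh)
      rw [hstep, ih (d.insert out p.2) ?_, hitems, hproj]
      · simp
      · rw [hitems]
        simpa using hnd

-- ===== VERDICT (by name: the statement is the Claim_ definition above) =====
theorem extract_http_info_spec : Claim_equal_extract_http_info := by
  intro banner _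
  unfold Spec_extract_http_info extract_http_info extract_http_info_alt
  set headers := (PySem.Str.splitlines banner).foldl pvBLineStep PySem.Dict.empty with hh
  have hA : ((PySem.Str.splitlines banner).foldl pvAStep PySem.Dict.empty).items
      = pvProj headers.items := pv_fold_rel _ _ _ (by rfl)
  have hnd : (headers.keys).Nodup := pv_fold_nodup _ _ (by simp)
  have hnd' : ((pvProj headers.items).map Prod.fst).Nodup :=
    pv_proj_nodup _ (by simpa only [PySem.Dict.keys] using hnd)
  have hB : (headers.items.foldl pvBProjStep PySem.Dict.empty).items
      = PySem.Dict.empty.items ++ pvProj headers.items := by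
    apply pv_proj_fold
    simpa [PySem.Dict.empty, PySem.Dict.items] using hnd'
  simp only [hA, hB]
  simp [PySem.Dict.empty]
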